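-- pv_equiv track=rewrite | github.com/Lihfdgjr/synapforge | scripts/build_next_launch.py | render_flag_lines
-- ===== SOURCE A (Python) =====
-- def render_flag_lines(flags: list[str], indent: str) -> str:
--     """Convert flags list into bash-multi-line-arg block.
--
--     PHASE_FLAGS are flat: ['--name', 'value', '--bool-flag', ...]. We
--     re-pair them: --name value -> "--name value \\" on one line,
--     standalone --bool-flag -> "--bool-flag \\".
--     """
--     if not flags:
--         return ""
--     lines: list[str] = []
--     i = 0
--     while i < len(flags):
--         tok = flags[i]
--         if not tok.startswith("--"):
--             # Should not happen given PHASE_FLAGS shape, but be safe.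
--             lines.append(f"{indent}{tok} \\")
--             i += 1
--             continue
--         # Look ahead: is the next token a value or another flag?
--         if i + 1 < len(flags) and not flags[i + 1].startswith("--"):
--             lines.append(f"{indent}{tok} {flags[i + 1]} \\")
--             i += 2
--         else:
--             lines.append(f"{indent}{tok} \\")
--             i += 1
--     return "\n".join(lines)
-- ===== SOURCE B (Python) =====
-- def render_flag_lines(flags: list[str], indent: str) -> str:
--     """Same re-pairing, written as a one-pass state machine: a '--' flag is
--     held as `pending` and emitted paired with the next non-flag token, or
--     standalone when another flag (or the end) follows."""
--     if not flags:
--         return ""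
--     lines: list[str] = []
--     pending = None
--     for tok in flags:
--         if tok.startswith("--"):
--             if pending is not None:
--                 lines.append(f"{indent}{pending} \\")
--             pending = tok
--         else:
--             if pending is not None:
--                 lines.append(f"{indent}{pending} {tok} \\")
--                 pending = None
--             else:
--                 lines.append(f"{indent}{tok} \\")
--     if pending is not None:
--         lines.append(f"{indent}{pending} \\")
--     return "\n".join(lines)
-- ===== Notes on version B (the rewrite author's own statement) =====
-- stated objective: alternative
-- what changed: Replaced the index-based while loop with lookahead (flags[i+1]) by a single forward pass holding a pending flag that is emitted paired with the next value or flushed standalone.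
import Mathlib
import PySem

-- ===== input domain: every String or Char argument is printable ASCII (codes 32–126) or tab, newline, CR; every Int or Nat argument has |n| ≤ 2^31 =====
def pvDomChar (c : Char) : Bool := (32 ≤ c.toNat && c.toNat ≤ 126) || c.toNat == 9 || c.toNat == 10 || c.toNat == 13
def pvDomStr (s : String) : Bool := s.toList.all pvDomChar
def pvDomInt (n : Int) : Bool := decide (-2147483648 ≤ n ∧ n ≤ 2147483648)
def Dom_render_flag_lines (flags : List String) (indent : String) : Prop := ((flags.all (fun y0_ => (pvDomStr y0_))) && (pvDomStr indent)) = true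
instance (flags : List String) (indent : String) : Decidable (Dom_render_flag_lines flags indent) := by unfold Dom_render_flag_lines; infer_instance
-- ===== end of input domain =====

-- B replaces A's index-based while loop with lookahead by a one-pass pending-flag
-- state machine (alternative decomposition, same cost); return values are equal.

-- ===== PORT A =====
-- A's while loop over index i, viewed through the suffix `flags.drop i`:
-- each iteration consumes one token (or two on the lookahead-pair branch).
def renderLoopA (indent : String) (l : List String) (lines : List String) : List String :=
  match l with
  | [] => lines
  | tok :: rest =>
    if ¬ (PySem.Str.startswith tok "--") then
      renderLoopA indent rest (lines ++ [indent ++ tok ++ " \\"])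
    else
      -- lookahead `i + 1 < len(flags) and not flags[i+1].startswith("--")`:
      -- rest ≠ [] plays i+1 < len, rest.headI is flags[i+1], rest.tail is drop (i+2)
      if rest ≠ [] ∧ ¬ (PySem.Str.startswith rest.headI "--") then
        renderLoopA indent rest.tail (lines ++ [indent ++ tok ++ " " ++ rest.headI ++ " \\"])
      else
        renderLoopA indent rest (lines ++ [indent ++ tok ++ " \\"])
termination_by l.length
decreasing_by all_goals simp

def render_flag_lines (flags : List String) (indent : String) : String :=
  if flags = [] then ""
  else PySem.Str.join "\n" (renderLoopA indent flags [])

-- ===== PORT B =====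
-- B's single forward pass carrying the pending flag, plus the final flush.
def renderLoopB (indent : String) (l : List String) (pending : Option String)
    (lines : List String) : List String :=
  match l with
  | [] =>
    match pending with
    | some p => lines ++ [indent ++ p ++ " \\"]
    | none => lines
  | tok :: rest =>
    if PySem.Str.startswith tok "--" then
      match pending with
      | some p => renderLoopB indent rest (some tok) (lines ++ [indent ++ p ++ " \\"])
      | none => renderLoopB indent rest (some tok) lines
    else
      match pending with
      | some p => renderLoopB indent rest none (lines ++ [indent ++ p ++ " " ++ tok ++ " \\"])
      | none => renderLoopB indent rest none (lines ++ [indent ++ tok ++ " \\"])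

def render_flag_lines_alt (flags : List String) (indent : String) : String :=
  if flags = [] then ""
  else PySem.Str.join "\n" (renderLoopB indent flags none [])

-- ===== PRECONDITION & SPEC =====
def Spec_render_flag_lines (flags : List String) (indent : String) (out : String) : Prop := out = render_flag_lines_alt flags indent
instance (flags : List String) (indent : String) (out : String) : Decidable (Spec_render_flag_lines flags indent out) := by unfold Spec_render_flag_lines; infer_instance

-- ===== CLAIM (what is proved, stated in full; the proofs are below) =====
def Claim_equal_render_flag_lines : Prop := ∀ (flags : List String) (indent : String), Dom_render_flag_lines flags indent → Spec_render_flag_lines flags indent (render_flag_lines flags indent)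

-- ===== LEMMAS AND PROOFS =====

-- B with no pending flag computes A's loop; B with pending flag p (a "--" token)
-- computes A's loop on p :: l.
theorem renderLoopB_eq_A (indent : String) (l : List String) :
    ∀ lines, renderLoopB indent l none lines = renderLoopA indent l lines ∧
      ∀ p, PySem.Str.startswith p "--" = true →
        renderLoopB indent l (some p) lines = renderLoopA indent (p :: l) lines := by
  induction l with
  | nil =>
    intro lines
    exact ⟨by simp [renderLoopB, renderLoopA],
      fun p hp => by simp only [renderLoopB, renderLoopA, hp]; simp⟩
  | cons tok rest ih =>
    intro lines
    constructor
    · cases h : PySem.Str.startswith tok "--" with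
      | true =>
        rw [show renderLoopB indent (tok :: rest) none lines
              = renderLoopB indent rest (some tok) lines by simp only [renderLoopB, h]; simp]
        exact (ih lines).2 tok h
      | false =>
        rw [show renderLoopB indent (tok :: rest) none lines
              = renderLoopB indent rest none (lines ++ [indent ++ tok ++ " \\"]) by
            simp only [renderLoopB, h]; simp]
        rw [show renderLoopA indent (tok :: rest) lines
              = renderLoopA indent rest (lines ++ [indent ++ tok ++ " \\"]) by
            simp only [renderLoopA, h]; simp]
        exact (ih _).1
    · intro p hp
      cases h : PySem.Str.startswith tok "--" with
      | true =>
        -- another flag follows: A emits p standalone and continues at tok;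
        -- B flushes p standalone and holds tok as pending.
        rw [show renderLoopB indent (tok :: rest) (some p) lines
              = renderLoopB indent rest (some tok) (lines ++ [indent ++ p ++ " \\"]) by
            simp only [renderLoopB, h]; simp]
        rw [show renderLoopA indent (p :: tok :: rest) lines
              = renderLoopA indent (tok :: rest) (lines ++ [indent ++ p ++ " \\"]) by
            simp only [renderLoopA, hp, h]; simp [show PySem.Chars.startswith tok.toList ['-','-'] = true from by simpa [PySem.Str.startswith] using h]]
        exact (ih _).2 tok h
      | false =>
        -- a value follows: both emit the pair and continue.
        rw [show renderLoopB indent (tok :: rest) (some p) lines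
              = renderLoopB indent rest none (lines ++ [indent ++ p ++ " " ++ tok ++ " \\"]) by
            simp only [renderLoopB, h]; simp]
        rw [show renderLoopA indent (p :: tok :: rest) lines
              = renderLoopA indent rest (lines ++ [indent ++ p ++ " " ++ tok ++ " \\"]) by
            simp only [renderLoopA, hp, h]; simp [show PySem.Chars.startswith tok.toList ['-','-'] = false from by simpa [PySem.Str.startswith] using h]]
        exact (ih _).1

-- ===== VERDICT (by name: the statement is the Claim_ definition above) =====
theorem render_flag_lines_spec : Claim_equal_render_flag_lines := by
  intro flags indent _
  unfold Spec_render_flag_lines render_flag_lines render_flag_lines_alt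
  rw [(renderLoopB_eq_A indent flags []).1]
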